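-- pv_equiv track=rewrite | github.com/evanfollis/cadence | tools/module_contexts.py | strip_duplicate_headers_at_top
-- ===== SOURCE A (Python) =====
-- def strip_duplicate_headers_at_top(lines):
--     """Remove all context summary header blocks at the file top (before any code)."""
--     out = []
--     i = 0
--     n = len(lines)
--     while i < n:
--         line = lines[i]
--         # Allow blank lines and comments to stay at top
--         if line.strip() == "" or line.strip().startswith("#"):
--             out.append(line)
--             i += 1
--             continue
--         # Remove all context headers at the top
--         if "# MODULE CONTEXT SUMMARY" in line:
--             while i < n and "# END MODULE CONTEXT SUMMARY" not in lines[i]: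
--                 i += 1
--             if i < n:
--                 i += 1  # Skip END marker
--             # Keep going in case of further headers
--             continue
--         break  # Non-header, non-blank, non-comment: stop removing
--     out.extend(lines[i:])
--     # Remove extra blank lines at the start
--     while len(out) > 1 and out[0].strip() == "" and out[1].strip() == "":
--         out = out[1:]
--     return out
-- ===== SOURCE B (Python) =====
-- START = "# MODULE CONTEXT SUMMARY"
-- END = "# END MODULE CONTEXT SUMMARY"
--
--
-- def strip_duplicate_headers_at_top(lines):
--     """Remove all context summary header blocks at the file top (before any code)."""
--     out = []
--     in_summary = False
--     done = False
--     for line in lines: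
--         if done:
--             out.append(line)
--         elif in_summary:
--             if END in line:
--                 in_summary = False
--         elif line.strip() == "" or line.strip().startswith("#"):
--             out.append(line)
--         elif START in line:
--             in_summary = END not in line
--         else:
--             done = True
--             out.append(line)
--     # Collapse the run of leading blank lines, keeping at most one of them
--     k = 0
--     while k < len(out) and out[k].strip() == "":
--         k += 1
--     return out[k - 1:] if k else out
-- ===== Notes on version B (the rewrite author's own statement) =====
-- stated objective: alternative
-- what changed: Replaced A's index-based nested while loops (inner loop scanning forward for the END marker, then out.extend of the tail) with a single flat forward pass driven by two state flags (in_summary, done), and replaced the repeated pop-one-blank loop by counting the leading blank run once and slicing.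
import Mathlib
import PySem

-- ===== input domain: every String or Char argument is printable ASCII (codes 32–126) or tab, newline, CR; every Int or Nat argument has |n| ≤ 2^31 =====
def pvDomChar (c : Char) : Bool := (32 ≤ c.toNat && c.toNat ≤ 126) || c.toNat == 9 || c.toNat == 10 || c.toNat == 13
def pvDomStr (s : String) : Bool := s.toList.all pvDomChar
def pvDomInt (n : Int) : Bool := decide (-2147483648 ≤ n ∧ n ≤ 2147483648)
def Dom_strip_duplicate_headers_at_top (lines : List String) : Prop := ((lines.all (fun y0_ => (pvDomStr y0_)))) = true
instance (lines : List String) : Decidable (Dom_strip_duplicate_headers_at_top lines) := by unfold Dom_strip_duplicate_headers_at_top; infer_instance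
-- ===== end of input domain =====

-- B replaces A's nested index-based while loops by one flat forward pass with two
-- state flags and a count-then-slice blank collapse (objective: alternative).

def pvStartMark : String := "# MODULE CONTEXT SUMMARY"
def pvEndMark : String := "# END MODULE CONTEXT SUMMARY"

-- ===== PORT A =====
-- A's inner `while i < n and END not in lines[i]: i += 1` followed by `i += 1`:
-- returns the suffix strictly after the first line containing the END marker.
def aSkip : List String → List String
  | [] => []
  | l :: rest => if PySem.Str.isIn pvEndMark l then rest else aSkip rest

theorem aSkip_length_le (xs : List String) : (aSkip xs).length ≤ xs.length := by
  induction xs with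
  | nil => simp [aSkip]
  | cons l rest ih => simp only [aSkip]; split <;> simp <;> omega

-- A's outer while loop over index i (recursion on the remaining suffix lines[i:]);
-- the final `break` + `out.extend(lines[i:])` is the `line :: rest` result.
def aMain : List String → List String
  | [] => []
  | line :: rest =>
    if PySem.Str.strip line = "" ∨ PySem.Str.startswith (PySem.Str.strip line) "#" then
      line :: aMain rest
    else if PySem.Str.isIn pvStartMark line then
      aMain (aSkip (line :: rest))
    else
      line :: rest
termination_by ls => ls.length
decreasing_by
  · simp
  · simp only [aSkip]
    split
    · simp
    · have := aSkip_length_le rest; simp; omega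

-- A's trailing `while len(out) > 1 and out[0].strip() == "" and out[1].strip() == "": out = out[1:]`
def aCollapse : List String → List String
  | a :: b :: rest =>
    if PySem.Str.strip a = "" ∧ PySem.Str.strip b = "" then aCollapse (b :: rest)
    else a :: b :: rest
  | xs => xs

def strip_duplicate_headers_at_top (lines : List String) : List String :=
  aCollapse (aMain lines)

-- ===== PORT B =====
-- One step of Source B's for-loop state machine; state = (out reversed, in_summary, done).
def bStep (st : List String × Bool × Bool) (line : String) : List String × Bool × Bool :=
  let out := st.1
  let insum := st.2.1
  let done := st.2.2
  if done then (line :: out, insum, done)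
  else if insum then
    if PySem.Str.isIn pvEndMark line then (out, false, done) else (out, insum, done)
  else if PySem.Str.strip line = "" ∨ PySem.Str.startswith (PySem.Str.strip line) "#" then
    (line :: out, insum, done)
  else if PySem.Str.isIn pvStartMark line then
    (out, !(PySem.Str.isIn pvEndMark line), done)
  else
    (line :: out, insum, true)

-- Source B's `while k < len(out) and out[k].strip() == "": k += 1` (length of leading blank run)
def bCount : List String → Nat
  | [] => 0
  | l :: rest => if PySem.Str.strip l = "" then bCount rest + 1 else 0

def strip_duplicate_headers_at_top_alt (lines : List String) : List String :=
  let out := (lines.foldl bStep ([], false, false)).1.reverse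
  let k := bCount out
  -- Python `out[k-1:]` with k ≥ 1 is List.drop (k-1) (non-negative slice start)
  if k = 0 then out else out.drop (k - 1)

-- ===== PRECONDITION & SPEC =====
def Spec_strip_duplicate_headers_at_top (lines : List String) (out : List String) : Prop := out = strip_duplicate_headers_at_top_alt lines
instance (lines : List String) (out : List String) : Decidable (Spec_strip_duplicate_headers_at_top lines out) := by unfold Spec_strip_duplicate_headers_at_top; infer_instance

-- ===== CLAIM (what is proved, stated in full; the proofs are below) =====
def Claim_equal_strip_duplicate_headers_at_top : Prop := ∀ (lines : List String), Dom_strip_duplicate_headers_at_top lines → Spec_strip_duplicate_headers_at_top lines (strip_duplicate_headers_at_top lines)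

-- ===== LEMMAS AND PROOFS =====

-- Forward (non-accumulator) description of B's state machine.
def fB : Bool → Bool → List String → List String
  | _, _, [] => []
  | insum, done, line :: rest =>
    if done then line :: fB insum done rest
    else if insum then fB (!(PySem.Str.isIn pvEndMark line)) false rest
    else if PySem.Str.strip line = "" ∨ PySem.Str.startswith (PySem.Str.strip line) "#" then
      line :: fB insum done rest
    else if PySem.Str.isIn pvStartMark line then
      fB (!(PySem.Str.isIn pvEndMark line)) false rest
    else
      line :: fB insum true rest

theorem foldl_bStep_eq_fB (ls : List String) :
    ∀ (acc : List String) (insum done : Bool),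
      ((ls.foldl bStep (acc, insum, done)).1).reverse = acc.reverse ++ fB insum done ls := by
  induction ls with
  | nil => intro acc insum done; simp [fB]
  | cons l rest ih =>
    intro acc insum done
    rw [List.foldl_cons]
    cases done with
    | true =>
      have hb : bStep (acc, insum, true) l = (l :: acc, insum, true) := rfl
      rw [hb, ih, fB]
      simp
    | false =>
      cases insum with
      | true =>
        by_cases h : PySem.Str.isIn pvEndMark l = true
        · have hb : bStep (acc, true, false) l = (acc, false, false) := by
            simp only [bStep, h]; rfl
          rw [hb, ih, fB]
          simp only [Bool.false_eq_true, if_false, if_true, h, Bool.not_true]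
        · have h' : PySem.Str.isIn pvEndMark l = false := by
            revert h; cases PySem.Str.isIn pvEndMark l <;> simp
          have hb : bStep (acc, true, false) l = (acc, true, false) := by
            simp only [bStep, h']; rfl
          rw [hb, ih, fB]
          simp only [Bool.false_eq_true, if_false, if_true, h', Bool.not_false]
      | false =>
        by_cases h1 : PySem.Str.strip l = "" ∨ PySem.Str.startswith (PySem.Str.strip l) "#" = true
        · have hb : bStep (acc, false, false) l = (l :: acc, false, false) := by
            simp only [bStep, h1]; rfl
          rw [hb, ih, fB]
          simp_all
        · by_cases h2 : PySem.Str.isIn pvStartMark l = true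
          · have hb : bStep (acc, false, false) l
                = (acc, !(PySem.Str.isIn pvEndMark l), false) := by
              simp only [bStep, h1, h2]; rfl
            rw [hb, ih, fB]
            simp_all
          · have hb : bStep (acc, false, false) l = (l :: acc, false, true) := by
              simp only [bStep, h1, h2]; rfl
            rw [hb, ih, fB]
            simp_all

theorem fB_done (insum : Bool) (ls : List String) : fB insum true ls = ls := by
  induction ls with
  | nil => rfl
  | cons l rest ih => simp [fB, ih]

theorem aMain_eq_fB_aux : ∀ (n : ℕ) (ls : List String), ls.length ≤ n →
    aMain ls = fB false false ls ∧ aMain (aSkip ls) = fB true false ls := by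
  intro n
  induction n with
  | zero =>
    intro ls hls
    have : ls = [] := List.eq_nil_of_length_eq_zero (Nat.le_zero.mp hls)
    subst this
    constructor <;> simp [aMain, aSkip, fB]
  | succ n ih =>
    intro ls hls
    match ls with
    | [] => constructor <;> simp [aMain, aSkip, fB]
    | l :: rest =>
      have hr : rest.length ≤ n := by simpa using Nat.lt_succ_iff.mp (by simpa using hls)
      constructor
      · -- part 1: aMain (l :: rest) = fB false false (l :: rest)
        simp only [aMain, fB, aSkip]
        split_ifs with h1 h2 h3 <;>
          simp_all [fB_done, (ih rest hr).1, (ih rest hr).2]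
      · -- part 2: aMain (aSkip (l :: rest)) = fB true false (l :: rest)
        simp only [aSkip, fB]
        split_ifs with h3 <;>
          simp_all [(ih rest hr).1, (ih rest hr).2]

theorem aMain_eq_fB (ls : List String) : aMain ls = fB false false ls :=
  (aMain_eq_fB_aux ls.length ls le_rfl).1

theorem aCollapse_eq_drop (out : List String) :
    aCollapse out = if bCount out = 0 then out else out.drop (bCount out - 1) := by
  induction out with
  | nil => simp [aCollapse, bCount]
  | cons a tail ih =>
    match tail with
    | [] =>
      simp only [aCollapse, bCount]
      split <;> simp
    | b :: rest =>
      by_cases hab : PySem.Str.strip a = "" ∧ PySem.Str.strip b = ""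
      · have hb : bCount (b :: rest) = bCount rest + 1 := by simp [bCount, hab.2]
        have := ih
        rw [hb] at this
        simp only [Nat.add_one_ne_zero, if_false, Nat.add_sub_cancel] at this
        simp [aCollapse, hab, bCount, hab.1, hab.2, this]
      · simp only [aCollapse, if_neg hab]
        by_cases ha : PySem.Str.strip a = ""
        · have hbne : ¬ PySem.Str.strip b = "" := fun h => hab ⟨ha, h⟩
          simp [bCount, ha, hbne]
        · simp [bCount, ha]

-- ===== VERDICT (by name: the statement is the Claim_ definition above) =====
theorem strip_duplicate_headers_at_top_spec : Claim_equal_strip_duplicate_headers_at_top := by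
  intro lines _
  unfold Spec_strip_duplicate_headers_at_top strip_duplicate_headers_at_top
    strip_duplicate_headers_at_top_alt
  have hfold := foldl_bStep_eq_fB lines [] false false
  simp only [List.reverse_nil, List.nil_append] at hfold
  rw [hfold, aMain_eq_fB, aCollapse_eq_drop]
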